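-- pv_equiv track=rewrite | github.com/vsrede/ithillel_basic_python_voriekhov | homework_9/task_5.py | group_by_surname
-- ===== SOURCE A (Python) =====
-- def group_by_surname(list_of_enrollees):  # returns 4 ints
--     a_i_enrollee, j_p_enrollee, q_t_enrollee, u_z_enrollee = 0, 0, 0, 0
--     # characters acc UTF(dec)
--     a_dec, i_dec, j_dec, p_dec, q_dec, t_dec = 65, 73, 74, 80, 81, 84
--
--     for num in list_of_enrollees:
--         first_let = ord(num[num.find(' ') + 1].upper())
--         if a_dec <= first_let <= i_dec:
--             a_i_enrollee += 1
--         elif j_dec <= first_let <= p_dec: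
--             j_p_enrollee += 1
--         elif q_dec <= first_let <= t_dec:
--             q_t_enrollee += 1
--         else:
--             u_z_enrollee += 1
--
--     return a_i_enrollee, j_p_enrollee, q_t_enrollee, u_z_enrollee
-- ===== SOURCE B (Python) =====
-- _BUCKET = {c: (0 if c <= 'I' else 1 if c <= 'P' else 2) for c in "ABCDEFGHIJKLMNOPQRST"}
--
--
-- def group_by_surname(list_of_enrollees):
--     buckets = [_BUCKET.get(s[s.find(' ') + 1].upper(), 3) for s in list_of_enrollees]
--     return buckets.count(0), buckets.count(1), buckets.count(2), buckets.count(3)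
-- ===== Notes on version B (the rewrite author's own statement) =====
-- stated objective: idiomatic
-- what changed: Replaces A's if/elif ordinal-range chain and four scalar accumulators with a precomputed initial->bucket dict driving a single map to bucket indices, whose four counts are read off with list.count.
import Mathlib
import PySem

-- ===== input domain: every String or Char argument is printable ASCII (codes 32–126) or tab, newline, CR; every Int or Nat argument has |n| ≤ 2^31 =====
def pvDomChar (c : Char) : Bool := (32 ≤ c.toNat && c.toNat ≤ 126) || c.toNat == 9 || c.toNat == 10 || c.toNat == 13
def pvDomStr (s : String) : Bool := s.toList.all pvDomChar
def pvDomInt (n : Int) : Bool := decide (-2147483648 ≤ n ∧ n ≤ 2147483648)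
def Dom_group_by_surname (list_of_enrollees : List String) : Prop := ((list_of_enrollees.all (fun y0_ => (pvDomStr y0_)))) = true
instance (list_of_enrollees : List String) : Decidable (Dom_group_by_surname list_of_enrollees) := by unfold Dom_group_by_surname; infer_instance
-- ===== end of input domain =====

-- B replaces A's if/elif ordinal-range chain with a precomputed initial->bucket dict, a map
-- to bucket indices and four list.count reads (idiomatic restructuring, same O(n) cost).


-- ===== PORT A =====
def group_by_surname (list_of_enrollees : List String) : Int × Int × Int × Int :=
  list_of_enrollees.foldl
    (fun acc num =>
      match PySem.Str.pyGet? num (PySem.Str.find num " " + 1) with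
      | none => acc  -- IndexError in Python; excluded by Pre_
      | some ch =>
        let first_let : Int := ((PySem.Chars.upperChar ch).toNat : Int)
        if 65 ≤ first_let ∧ first_let ≤ 73 then (acc.1 + 1, acc.2.1, acc.2.2.1, acc.2.2.2)
        else if 74 ≤ first_let ∧ first_let ≤ 80 then (acc.1, acc.2.1 + 1, acc.2.2.1, acc.2.2.2)
        else if 81 ≤ first_let ∧ first_let ≤ 84 then (acc.1, acc.2.1, acc.2.2.1 + 1, acc.2.2.2)
        else (acc.1, acc.2.1, acc.2.2.1, acc.2.2.2 + 1))
    (0, 0, 0, 0)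

-- ===== PORT B =====
-- the module-level dict _BUCKET of Source B
def pvBucketTable : PySem.Dict Char Int :=
  ("ABCDEFGHIJKLMNOPQRST".toList).foldl
    (fun d c => d.insert c (if c ≤ 'I' then 0 else if c ≤ 'P' then 1 else 2)) PySem.Dict.empty

-- the comprehension body: _BUCKET.get(s[s.find(' ') + 1].upper(), 3)
def pvBucketOf (s : String) : Int :=
  match PySem.Str.pyGet? s (PySem.Str.find s " " + 1) with
  | none => 3  -- IndexError in Python; excluded by Pre_
  | some ch => PySem.Dict.getD pvBucketTable (PySem.Chars.upperChar ch) 3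

def group_by_surname_alt (list_of_enrollees : List String) : Int × Int × Int × Int :=
  let buckets := list_of_enrollees.map pvBucketOf
  ((buckets.count 0 : Int), (buckets.count 1 : Int), (buckets.count 2 : Int), (buckets.count 3 : Int))

-- ===== PRECONDITION & SPEC =====
-- Pre_ excludes exactly the inputs on which A raises IndexError (and B raises it too): a list
-- containing a string whose character index find(' ')+1 is out of range.
def Pre_group_by_surname (list_of_enrollees : List String) : Prop :=
  ∀ s ∈ list_of_enrollees, PySem.Str.find s " " + 1 < (s.toList.length : Int)
instance (list_of_enrollees : List String) : Decidable (Pre_group_by_surname list_of_enrollees) := by unfold Pre_group_by_surname; infer_instance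

def pvWitness_group_by_surname : List String := ["Ivanov Ivan", "q", "Petrov P", "!?"]

def Spec_group_by_surname (list_of_enrollees : List String) (out : Int × Int × Int × Int) : Prop := out = group_by_surname_alt list_of_enrollees
instance (list_of_enrollees : List String) (out : Int × Int × Int × Int) : Decidable (Spec_group_by_surname list_of_enrollees out) := by unfold Spec_group_by_surname; infer_instance

-- ===== CLAIM (what is proved, stated in full; the proofs are below) =====
def Claim_equal_group_by_surname : Prop := ∀ (list_of_enrollees : List String), Dom_group_by_surname list_of_enrollees → Pre_group_by_surname list_of_enrollees → Spec_group_by_surname list_of_enrollees (group_by_surname list_of_enrollees)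

-- ===== LEMMAS AND PROOFS =====

theorem pvLetters : "ABCDEFGHIJKLMNOPQRST".toList = ['A','B','C','D','E','F','G','H','I','J','K','L','M','N','O','P','Q','R','S','T'] := by decide

-- the dict lookup agrees with A's ordinal-range classification, for every char
theorem pvBucketTable_getD (c : Char) :
    PySem.Dict.getD pvBucketTable c 3 =
      (if 65 ≤ ((c.toNat : Int)) ∧ ((c.toNat : Int)) ≤ 73 then 0
       else if 74 ≤ ((c.toNat : Int)) ∧ ((c.toNat : Int)) ≤ 80 then 1
       else if 81 ≤ ((c.toNat : Int)) ∧ ((c.toNat : Int)) ≤ 84 then 2 else 3) := by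
  by_cases h : 65 ≤ c.toNat ∧ c.toNat ≤ 84
  · obtain ⟨h1, h2⟩ := h
    interval_cases hn : c.toNat <;>
      · have hc := Char.ofNat_toNat c
        rw [hn] at hc
        subst hc
        decide
  · have hl : PySem.Dict.getD pvBucketTable c 3 = 3 := by
      apply PySem.Dict.getD_of_not_contains
      have hk : c ∉ pvBucketTable.keys := by
        simp only [pvBucketTable, pvLetters, PySem.Dict.keys_foldl_insert]
        intro hmem
        rw [PySem.Set.mem_update] at hmem
        rcases hmem with hmem | hmem
        · simp [PySem.Dict.keys_empty] at hmem
        · fin_cases hmem <;> simp_all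
      rw [PySem.Dict.contains_eq_decide_mem_keys]
      simpa using hk
    rw [hl]
    split_ifs with h1 h2 h3 <;> omega

theorem pvBucketOf_spec (s : String) (ch : Char)
    (h : PySem.Str.pyGet? s (PySem.Str.find s " " + 1) = some ch) :
    pvBucketOf s =
      (if 65 ≤ (((PySem.Chars.upperChar ch).toNat : Int)) ∧ (((PySem.Chars.upperChar ch).toNat : Int)) ≤ 73 then 0
       else if 74 ≤ (((PySem.Chars.upperChar ch).toNat : Int)) ∧ (((PySem.Chars.upperChar ch).toNat : Int)) ≤ 80 then 1
       else if 81 ≤ (((PySem.Chars.upperChar ch).toNat : Int)) ∧ (((PySem.Chars.upperChar ch).toNat : Int)) ≤ 84 then 2 else 3) := by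
  have h' : PySem.List.pyGet? s.toList (PySem.Chars.find s.toList [' '] + 1) = some ch := by
    simpa using h
  simp [pvBucketOf, h', pvBucketTable_getD]

theorem pv_fold_counts (l : List String) (a b c d : Int)
    (hpre : ∀ s ∈ l, PySem.Str.find s " " + 1 < (s.toList.length : Int)) :
    l.foldl
      (fun acc num =>
        match PySem.Str.pyGet? num (PySem.Str.find num " " + 1) with
        | none => acc
        | some ch =>
          let first_let : Int := ((PySem.Chars.upperChar ch).toNat : Int)
          if 65 ≤ first_let ∧ first_let ≤ 73 then (acc.1 + 1, acc.2.1, acc.2.2.1, acc.2.2.2)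
          else if 74 ≤ first_let ∧ first_let ≤ 80 then (acc.1, acc.2.1 + 1, acc.2.2.1, acc.2.2.2)
          else if 81 ≤ first_let ∧ first_let ≤ 84 then (acc.1, acc.2.1, acc.2.2.1 + 1, acc.2.2.2)
          else (acc.1, acc.2.1, acc.2.2.1, acc.2.2.2 + 1))
      (a, b, c, d) =
    (a + ((l.map pvBucketOf).count 0 : Int), b + ((l.map pvBucketOf).count 1 : Int),
     c + ((l.map pvBucketOf).count 2 : Int), d + ((l.map pvBucketOf).count 3 : Int)) := by
  induction l generalizing a b c d with
  | nil => simp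
  | cons s t ih =>
    have hs := hpre s (by simp)
    have hrest : ∀ x ∈ t, PySem.Str.find x " " + 1 < (x.toList.length : Int) :=
      fun x hx => hpre x (by simp [hx])
    obtain ⟨ch, hch⟩ : ∃ ch, PySem.Str.pyGet? s (PySem.Str.find s " " + 1) = some ch := by
      cases hx : PySem.Str.pyGet? s (PySem.Str.find s " " + 1) with
      | some ch => exact ⟨ch, rfl⟩
      | none =>
        exfalso
        simp only [PySem.Str.pyGet?_eq] at hx
        rw [PySem.Chars.pyGet?_eq_listPyGet?, PySem.List.pyGet?_eq_none_iff] at hx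
        apply hx
        have hge := PySem.Chars.neg_one_le_find s.toList " ".toList
        simp only [PySem.Str.find_eq] at hs ⊢
        constructor <;> omega
    have hb := pvBucketOf_spec s ch hch
    simp only [List.foldl_cons, List.map_cons, hch]
    split_ifs with h1 h2 h3
    · rw [ih _ _ _ _ hrest]
      have hv : pvBucketOf s = 0 := by rw [hb, if_pos h1]
      simp only [hv, List.count_cons, Prod.mk.injEq]
      norm_num
      omega
    · rw [ih _ _ _ _ hrest]
      have hv : pvBucketOf s = 1 := by rw [hb, if_neg h1, if_pos h2]
      simp only [hv, List.count_cons, Prod.mk.injEq]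
      norm_num
      omega
    · rw [ih _ _ _ _ hrest]
      have hv : pvBucketOf s = 2 := by rw [hb, if_neg h1, if_neg h2, if_pos h3]
      simp only [hv, List.count_cons, Prod.mk.injEq]
      norm_num
      omega
    · rw [ih _ _ _ _ hrest]
      have hv : pvBucketOf s = 3 := by rw [hb, if_neg h1, if_neg h2, if_neg h3]
      simp only [hv, List.count_cons, Prod.mk.injEq]
      norm_num
      omega

-- ===== VERDICT (by name: the statement is the Claim_ definition above) =====
theorem group_by_surname_spec : Claim_equal_group_by_surname := by
  intro l _ hpre
  unfold Spec_group_by_surname group_by_surname group_by_surname_alt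
  rw [pv_fold_counts l 0 0 0 0 hpre]
  simp
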